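-- pv_equiv track=rewrite | github.com/hassantahan/islamic_times | src/islamic_times/mapper/compute.py | _split_chunk_ranges
-- ===== SOURCE A (Python) =====
-- def _split_chunk_ranges(
--     total_rows: int,
--     workers: int,
--     chunk_multiplier: int,
--     min_chunk_rows: int,
-- ) -> list[tuple[int, int]]:
--     if total_rows < 1:
--         return []
--     target_chunks = min(total_rows, max(1, workers * max(1, chunk_multiplier)))
--     max_chunks_for_min_rows = max(1, total_rows // max(1, min_chunk_rows))
--     target_chunks = min(target_chunks, max_chunks_for_min_rows)
--     target_chunks = max(1, target_chunks)
--
--     base, remainder = divmod(total_rows, target_chunks)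
--     ranges: list[tuple[int, int]] = []
--     start = 0
--     for idx in range(target_chunks):
--         rows = base + (1 if idx < remainder else 0)
--         end = start + rows
--         if end > start:
--             ranges.append((start, end))
--         start = end
--     return ranges
-- ===== SOURCE B (Python) =====
-- def _split_chunk_ranges(
--     total_rows: int,
--     workers: int,
--     chunk_multiplier: int,
--     min_chunk_rows: int,
-- ) -> list[tuple[int, int]]:
--     if total_rows < 1:
--         return []
--     chunks = min(
--         total_rows,
--         max(1, workers * max(1, chunk_multiplier)),
--         max(1, total_rows // max(1, min_chunk_rows)),
--     )
--     # Greedy even split: each step hands the next chunk the ceiling of its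
--     # fair share of the rows still left, so no divmod/remainder bookkeeping.
--     ranges = []
--     start = 0
--     rows = total_rows
--     while chunks > 0:
--         size = -(-rows // chunks)
--         ranges.append((start, start + size))
--         start += size
--         rows -= size
--         chunks -= 1
--     return ranges
-- ===== Notes on version B (the rewrite author's own statement) =====
-- stated objective: alternative
-- what changed: Replaces the divmod-precompute loop (base size plus remainder conditional plus emptiness check) with a greedy even splitter: each step takes the ceiling of remaining_rows/remaining_chunks, and the three clamps collapse into one 3-way min.
import Mathlib
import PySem

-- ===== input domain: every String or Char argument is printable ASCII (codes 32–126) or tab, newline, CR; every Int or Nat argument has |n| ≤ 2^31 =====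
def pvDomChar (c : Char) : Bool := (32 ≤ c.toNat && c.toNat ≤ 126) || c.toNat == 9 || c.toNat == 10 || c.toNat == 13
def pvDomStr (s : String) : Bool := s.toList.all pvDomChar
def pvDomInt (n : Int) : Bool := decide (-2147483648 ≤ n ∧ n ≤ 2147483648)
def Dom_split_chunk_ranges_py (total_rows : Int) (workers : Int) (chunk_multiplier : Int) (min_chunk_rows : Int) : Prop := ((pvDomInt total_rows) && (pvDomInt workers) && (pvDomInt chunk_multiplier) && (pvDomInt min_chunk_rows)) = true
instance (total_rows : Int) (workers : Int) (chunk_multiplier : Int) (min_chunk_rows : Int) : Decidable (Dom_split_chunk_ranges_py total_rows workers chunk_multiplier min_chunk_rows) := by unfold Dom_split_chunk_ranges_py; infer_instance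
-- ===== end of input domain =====

-- B replaces A's divmod-precompute loop (base + remainder conditional + emptiness check)
-- by a greedy even splitter taking the ceiling of remaining rows over remaining chunks,
-- with the clamps collapsed into one 3-way min (objective: alternative decomposition).

-- ===== PORT A =====
def split_chunk_ranges_py (total_rows : Int) (workers : Int) (chunk_multiplier : Int) (min_chunk_rows : Int) : List (Int × Int) :=
  if total_rows < 1 then []
  else
    let target_chunks := min total_rows (max 1 (workers * max 1 chunk_multiplier))
    let max_chunks_for_min_rows := max 1 (PySem.Int.floordiv total_rows (max 1 min_chunk_rows))
    let target_chunks := min target_chunks max_chunks_for_min_rows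
    let target_chunks := max 1 target_chunks
    let base := PySem.Int.floordiv total_rows target_chunks
    let remainder := PySem.Int.mod total_rows target_chunks
    -- for idx in range(target_chunks): thread (ranges, start)
    let res := (PySem.List.pyRange 0 target_chunks 1).foldl
      (fun (st : List (Int × Int) × Int) idx =>
        let rows := base + (if idx < remainder then 1 else 0)
        let e := st.2 + rows
        (if e > st.2 then st.1 ++ [(st.2, e)] else st.1, e))
      ([], 0)
    res.1

-- ===== PORT B =====
-- the while loop of Source B: while chunks > 0, append the ceiling share and shrink
def pvGreedy (ranges : List (Int × Int)) (start rows chunks : Int) : List (Int × Int) :=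
  if h : chunks ≤ 0 then ranges
  else
    let size := -(PySem.Int.floordiv (-rows) chunks)
    pvGreedy (ranges ++ [(start, start + size)]) (start + size) (rows - size) (chunks - 1)
termination_by chunks.toNat
decreasing_by omega

def split_chunk_ranges_py_alt (total_rows : Int) (workers : Int) (chunk_multiplier : Int) (min_chunk_rows : Int) : List (Int × Int) :=
  if total_rows < 1 then []
  else
    let chunks := min total_rows (min (max 1 (workers * max 1 chunk_multiplier))
      (max 1 (PySem.Int.floordiv total_rows (max 1 min_chunk_rows))))
    pvGreedy [] 0 total_rows chunks

-- ===== PRECONDITION & SPEC =====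
def Spec_split_chunk_ranges_py (total_rows : Int) (workers : Int) (chunk_multiplier : Int) (min_chunk_rows : Int) (out : List (Int × Int)) : Prop := out = split_chunk_ranges_py_alt total_rows workers chunk_multiplier min_chunk_rows
instance (total_rows : Int) (workers : Int) (chunk_multiplier : Int) (min_chunk_rows : Int) (out : List (Int × Int)) : Decidable (Spec_split_chunk_ranges_py total_rows workers chunk_multiplier min_chunk_rows out) := by unfold Spec_split_chunk_ranges_py; infer_instance

-- ===== CLAIM =====
def Claim_equal_split_chunk_ranges_py : Prop := ∀ (total_rows : Int) (workers : Int) (chunk_multiplier : Int) (min_chunk_rows : Int), Dom_split_chunk_ranges_py total_rows workers chunk_multiplier min_chunk_rows → Spec_split_chunk_ranges_py total_rows workers chunk_multiplier min_chunk_rows (split_chunk_ranges_py total_rows workers chunk_multiplier min_chunk_rows)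

-- ===== LEMMAS AND PROOFS =====

-- A-side loop invariant: after n indices the accumulator holds the closed-form
-- ranges and start = n*base + min n r.
lemma loop_closed_form (base r : Int) (hb : 1 ≤ base) (hr : 0 ≤ r) (n : Nat) :
    ((PySem.List.pyRange 0 (n : Int) 1).foldl
      (fun (st : List (Int × Int) × Int) idx =>
        let rows := base + (if idx < r then 1 else 0)
        let e := st.2 + rows
        (if e > st.2 then st.1 ++ [(st.2, e)] else st.1, e))
      ([], 0))
    = ((PySem.List.pyRange 0 (n : Int) 1).map
        (fun i => (i * base + min i r, (i + 1) * base + min (i + 1) r)),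
       (n : Int) * base + min (n : Int) r) := by
  induction n with
  | zero => simp [PySem.List.pyRange_one_eq_nil]; omega
  | succ n ih =>
    have hsplit : PySem.List.pyRange 0 ((n : Int) + 1) 1
        = PySem.List.pyRange 0 (n : Int) 1 ++ [(n : Int)] :=
      PySem.List.pyRange_one_succ_right (by positivity)
    push_cast
    rw [hsplit, List.foldl_append, ih, List.map_append]
    simp only [List.foldl_cons, List.foldl_nil, List.map_cons, List.map_nil]
    have hmin : min ((n : Int) + 1) r = min (n : Int) r + (if (n : Int) < r then 1 else 0) := by
      split_ifs <;> omega
    have hpos : (n : Int) * base + min (n : Int) r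
        < (n : Int) * base + min (n : Int) r + (base + (if (n : Int) < r then 1 else 0)) := by
      split_ifs <;> omega
    simp only [gt_iff_lt, hpos, if_pos]
    have key : (n : Int) * base + min (n : Int) r + (base + (if (n : Int) < r then 1 else 0))
        = ((n : Int) + 1) * base + min ((n : Int) + 1) r := by rw [hmin]; ring
    rw [key]

-- B-side invariant: the greedy ceiling splitter of rows = n*b + r into n chunks
-- produces the same closed-form ranges, shifted by the start offset.
lemma greedy_closed_form (b : Int) (n : Nat) : ∀ (acc : List (Int × Int)) (s r : Int),
    0 ≤ r → (r < (n : Int) ∨ ((n : Int) = 0 ∧ r = 0)) →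
    pvGreedy acc s ((n : Int) * b + r) (n : Int)
    = acc ++ (PySem.List.pyRange 0 (n : Int) 1).map
        (fun i => (s + i * b + min i r, s + (i + 1) * b + min (i + 1) r)) := by
  induction n with
  | zero =>
    intro acc s r hr0 hrn
    have : r = 0 := by omega
    subst this
    rw [pvGreedy]
    simp [PySem.List.pyRange_one_eq_nil]
  | succ n ih =>
    intro acc s r hr0 hrn
    have hrn' : r < (n : Int) + 1 := by push_cast at hrn ⊢; omega
    have hpos : (0 : Int) < (n : Int) + 1 := by positivity
    push_cast
    rw [pvGreedy]
    simp only [dif_neg (by omega : ¬ ((n : Int) + 1 ≤ 0))]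
    have hsize : -(PySem.Int.floordiv (-(((n : Int) + 1) * b + r)) ((n : Int) + 1))
        = b + (if 0 < r then 1 else 0) := by
      rw [PySem.Int.neg_floordiv_neg_eq_iff_of_pos hpos]
      constructor <;> split_ifs <;> nlinarith
    rw [hsize]
    have harg : ((n : Int) + 1) * b + r - (b + (if 0 < r then 1 else 0))
        = (n : Int) * b + (r - (if 0 < r then 1 else 0)) := by ring
    have hstep : ((n : Int) + 1) - 1 = (n : Int) := by ring
    rw [harg, hstep, ih _ _ _ (by omega) (by split_ifs <;> omega)]
    -- reindex: range 0 (n+1) = 0 :: shift of range 0 n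
    have hcons : PySem.List.pyRange 0 ((n : Int) + 1) 1
        = 0 :: PySem.List.pyRange 1 ((n : Int) + 1) 1 := by
      rw [PySem.List.pyRange_one_cons (by omega)]; norm_num
    rw [hcons, List.map_cons, List.append_assoc]
    congr 1
    rw [List.singleton_append]
    congr 1
    · -- head element
      have hm0 : min (0 : Int) r = 0 := by omega
      have hm1 : min (1 : Int) r = (if 0 < r then 1 else 0) := by split_ifs <;> omega
      simp only [Prod.mk.injEq]
      refine ⟨by rw [hm0]; ring_nf, ?_⟩
      rw [show ((0:Int) + 1) = 1 by norm_num, hm1]; ring_nf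
    · -- tails: both ranges are maps of List.range n
      rw [PySem.List.pyRange_one (1) ((n : Int) + 1), PySem.List.pyRange_one 0 (n : Int)]
      have h1 : (((n : Int) + 1) - 1).toNat = n := by omega
      have h2 : ((n : Int) - 0).toNat = n := by omega
      rw [h1, h2, List.map_map, List.map_map]
      apply List.map_congr_left
      intro k _
      simp only [Function.comp_apply, Prod.mk.injEq]
      constructor
      · have : min (1 + (k : Int)) r
            = min (k : Int) (r - (if 0 < r then 1 else 0)) + (if 0 < r then 1 else 0) := by
          split_ifs <;> omega
        rw [this]; ring_nf
      · have : min (1 + (k : Int) + 1) r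
            = min ((k : Int) + 1) (r - (if 0 < r then 1 else 0)) + (if 0 < r then 1 else 0) := by
          split_ifs <;> omega
        rw [this]; ring_nf

theorem split_chunk_ranges_py_spec : Claim_equal_split_chunk_ranges_py := by
  intro total_rows workers chunk_multiplier min_chunk_rows _hdom
  unfold Spec_split_chunk_ranges_py split_chunk_ranges_py split_chunk_ranges_py_alt
  by_cases h : total_rows < 1
  · simp [h]
  · simp only [h, if_false]
    set c1 := max 1 (workers * max 1 chunk_multiplier) with hc1
    set c2 := max 1 (PySem.Int.floordiv total_rows (max 1 min_chunk_rows)) with hc2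
    have htr : 1 ≤ total_rows := by omega
    have hc1' : 1 ≤ c1 := le_max_left _ _
    have hc2' : 1 ≤ c2 := le_max_left _ _
    -- A's clamped count equals B's 3-way min
    have hk : max 1 (min (min total_rows c1) c2) = min total_rows (min c1 c2) := by omega
    rw [hk]
    set k := min total_rows (min c1 c2) with hkdef
    have hk1 : 1 ≤ k := by omega
    have hkle : k ≤ total_rows := min_le_left _ _
    have hk0 : (0 : Int) < k := by omega
    have hfd : PySem.Int.floordiv total_rows k = total_rows / k :=
      PySem.Int.floordiv_eq_ediv_of_pos hk0
    have hmd : PySem.Int.mod total_rows k = total_rows % k :=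
      PySem.Int.mod_eq_emod_of_pos hk0
    have hb : 1 ≤ PySem.Int.floordiv total_rows k := by
      rw [hfd]; exact (Int.le_ediv_iff_mul_le hk0).mpr (by omega)
    have hr0 : 0 ≤ PySem.Int.mod total_rows k := by
      rw [hmd]; exact Int.emod_nonneg _ (by omega)
    have hrk : PySem.Int.mod total_rows k < k := by
      rw [hmd]; exact Int.emod_lt_of_pos _ hk0
    have hn : ((k.toNat : Int)) = k := Int.toNat_of_nonneg (by omega)
    -- A side: closed form
    have hA := loop_closed_form (PySem.Int.floordiv total_rows k)
      (PySem.Int.mod total_rows k) hb hr0 k.toNat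
    rw [hn] at hA
    rw [hA]
    -- B side: closed form
    have hdecomp : total_rows = k * (PySem.Int.floordiv total_rows k) + PySem.Int.mod total_rows k := by
      rw [hfd, hmd]; have := Int.emod_add_mul_ediv total_rows k; omega
    have hB := greedy_closed_form (PySem.Int.floordiv total_rows k) k.toNat []
      0 (PySem.Int.mod total_rows k) hr0 (by rw [hn]; omega)
    rw [hn] at hB
    rw [show (k : Int) * (PySem.Int.floordiv total_rows k) + PySem.Int.mod total_rows k
        = total_rows from hdecomp.symm] at hB
    rw [hB]
    simp only [List.nil_append, zero_add]
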